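-- pv_equiv track=rewrite | github.com/iponika/MCTS-Code-Scoring | open-r1/src/open_r1/rewards.py | validate_step_format
-- ===== SOURCE A (Python) =====
-- def validate_step_format(text):
--     steps = text.strip().split('</step>')
--     steps = [s.strip() for s in steps if s.strip()]
--
--     if not steps:
--         return False
--
--     prev_num = None
--
--     for i, step in enumerate(steps):
--         if not step.startswith('<step>'):
--             return False
--
--         content = step[6:].strip()
--
--         if '```' in content:
--             if '<code>' not in content:
--                 return False
--             if i!=len(steps)-1:
--                 return False
--         else:
--             first_line = content.split('\n')[0].strip()
--             if not first_line or not first_line[0].isdigit():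
--                 return False
--             current_num = int(first_line[0])
--             if prev_num is not None and current_num != prev_num + 1:
--                 return False
--             prev_num = current_num
--     return True
-- ===== SOURCE B (Python) =====
-- def validate_step_format(text):
--     steps = [s.strip() for s in text.strip().split('</step>') if s.strip()]
--     if not steps:
--         return False
--     # phase 1: every step opens with the tag
--     if not all(s.startswith('<step>') for s in steps):
--         return False
--     contents = [s[6:].strip() for s in steps]
--     # phase 2: code rule — a step containing ``` must contain <code> and be last
--     for i, c in enumerate(contents):
--         if '```' in c:
--             if '<code>' not in c or i != len(contents) - 1:
--                 return False
--     # phase 3: collect the leading digits of the non-code steps; they must be consecutive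
--     nums = []
--     for c in contents:
--         if '```' not in c:
--             first_line = c.split('\n')[0].strip()
--             if not first_line or not first_line[0].isdigit():
--                 return False
--             nums.append(int(first_line[0]))
--     return nums == list(range(nums[0], nums[0] + len(nums))) if nums else True
-- ===== Notes on version B (the rewrite author's own statement) =====
-- stated objective: alternative
-- what changed: A's single interleaved loop with a running prev_num accumulator and an index test is split into three independent phases over the cleaned step list: an all() tag check, a code-rule scan, and a collected list of leading digits compared against list(range(first, first+len)).
import Mathlib
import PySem

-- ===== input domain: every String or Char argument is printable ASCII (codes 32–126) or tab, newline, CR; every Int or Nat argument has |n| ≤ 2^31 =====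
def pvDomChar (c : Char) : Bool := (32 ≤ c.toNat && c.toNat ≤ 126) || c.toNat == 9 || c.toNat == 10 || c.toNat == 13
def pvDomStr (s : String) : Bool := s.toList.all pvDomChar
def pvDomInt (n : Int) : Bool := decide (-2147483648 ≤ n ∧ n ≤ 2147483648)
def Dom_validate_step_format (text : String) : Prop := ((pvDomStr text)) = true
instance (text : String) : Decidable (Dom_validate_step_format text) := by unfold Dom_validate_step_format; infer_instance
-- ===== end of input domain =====

-- B reorganises A's single interleaved loop (running prev_num + index test) into three
-- independent phases over the same cleaned step list; objective: alternative decomposition, same cost.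

-- shared expressions (identical source text in Source A and Source B):
-- [s.strip() for s in text.strip().split('</step>') if s.strip()]
def pvCleanSteps (text : String) : List (List Char) :=
  ((PySem.Chars.splitOn (PySem.Chars.strip text.toList) "</step>".toList).map
      PySem.Chars.strip).filter (fun s => s ≠ [])
-- step[6:].strip()
def pvContent (step : List Char) : List Char :=
  PySem.Chars.strip (PySem.List.slice step (some 6) none)
-- content.split('\n')[0].strip()  (split never returns an empty list, so [0] = headD)
def pvFirstLine (content : List Char) : List Char :=
  PySem.Chars.strip ((PySem.Chars.splitOn content "\n".toList).headD [])

-- ===== PORT A =====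
-- A's single loop: index i, total n, running prev_num; branches in source order.
-- int(first_line[0]) with first_line[0].isdigit() checked is exactly c.toNat - 48.
def pvLoopA (steps : List (List Char)) (i n : Nat) (prev : Option Int) : Bool :=
  match steps with
  | [] => true
  | step :: rest =>
    if ¬ PySem.Chars.startswith step "<step>".toList then false
    else
      if PySem.Chars.isIn "```".toList (pvContent step) then
        if ¬ PySem.Chars.isIn "<code>".toList (pvContent step) then false
        else if i ≠ n - 1 then false
        else pvLoopA rest (i+1) n prev
      else
        match pvFirstLine (pvContent step) with
        | [] => false
        | c :: _ =>
          if ¬ PySem.Chars.isdigit c then false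
          else
            match prev with
            | some p => if ((c.toNat - 48 : Nat) : Int) ≠ p + 1 then false
                        else pvLoopA rest (i+1) n (some ((c.toNat - 48 : Nat) : Int))
            | none => pvLoopA rest (i+1) n (some ((c.toNat - 48 : Nat) : Int))

def validate_step_format (text : String) : Bool :=
  if pvCleanSteps text = [] then false
  else pvLoopA (pvCleanSteps text) 0 (pvCleanSteps text).length none

-- ===== PORT B =====
-- phase 2 of Source B: the for-loop over enumerate(contents) with early return
def pvCodeLoop (contents : List (List Char)) (i n : Nat) : Bool :=
  match contents with
  | [] => true
  | c :: rest =>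
    if PySem.Chars.isIn "```".toList c then
      if ¬ PySem.Chars.isIn "<code>".toList c ∨ i ≠ n - 1 then false
      else pvCodeLoop rest (i+1) n
    else pvCodeLoop rest (i+1) n

-- phase 3 of Source B: collect leading digits of non-code steps; none = the early False return
def pvNums (contents : List (List Char)) : Option (List Int) :=
  match contents with
  | [] => some []
  | c :: rest =>
    if PySem.Chars.isIn "```".toList c then pvNums rest
    else
      match pvFirstLine c with
      | [] => none
      | d :: _ =>
        if ¬ PySem.Chars.isdigit d then none
        else (pvNums rest).map (fun ns => ((d.toNat - 48 : Nat) : Int) :: ns)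

def validate_step_format_alt (text : String) : Bool :=
  if pvCleanSteps text = [] then false
  else if ¬ (pvCleanSteps text).all (fun s => PySem.Chars.startswith s "<step>".toList) then false
  else
    if ¬ pvCodeLoop ((pvCleanSteps text).map pvContent) 0
        ((pvCleanSteps text).map pvContent).length then false
    else
      match pvNums ((pvCleanSteps text).map pvContent) with
      | none => false
      | some [] => true
      | some (n :: ns) =>
        decide ((n :: ns) = PySem.List.pyRange n (n + ((n :: ns).length : Nat)) 1)

-- ===== PRECONDITION & SPEC =====
def Spec_validate_step_format (text : String) (out : Bool) : Prop := out = validate_step_format_alt text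
instance (text : String) (out : Bool) : Decidable (Spec_validate_step_format text out) := by unfold Spec_validate_step_format; infer_instance

-- ===== CLAIM (what is proved, stated in full; the proofs are below) =====
def Claim_equal_validate_step_format : Prop := ∀ (text : String), Dom_validate_step_format text → Spec_validate_step_format text (validate_step_format text)

-- ===== LEMMAS AND PROOFS =====

-- A's loop with the "last step" test written structurally (rest = [])
def pvLoopA' (steps : List (List Char)) (prev : Option Int) : Bool :=
  match steps with
  | [] => true
  | step :: rest =>
    if ¬ PySem.Chars.startswith step "<step>".toList then false
    else
      if PySem.Chars.isIn "```".toList (pvContent step) then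
        if ¬ PySem.Chars.isIn "<code>".toList (pvContent step) then false
        else if rest ≠ [] then false
        else pvLoopA' rest prev
      else
        match pvFirstLine (pvContent step) with
        | [] => false
        | c :: _ =>
          if ¬ PySem.Chars.isdigit c then false
          else
            match prev with
            | some p => if ((c.toNat - 48 : Nat) : Int) ≠ p + 1 then false
                        else pvLoopA' rest (some ((c.toNat - 48 : Nat) : Int))
            | none => pvLoopA' rest (some ((c.toNat - 48 : Nat) : Int))

def pvCodeLoop' (contents : List (List Char)) : Bool :=
  match contents with
  | [] => true
  | c :: rest =>
    if PySem.Chars.isIn "```".toList c then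
      if ¬ PySem.Chars.isIn "<code>".toList c ∨ rest ≠ [] then false
      else pvCodeLoop' rest
    else pvCodeLoop' rest

def pvConsecFrom (prev : Option Int) (ns : List Int) : Bool :=
  match ns with
  | [] => true
  | x :: xs =>
    match prev with
    | some p => (x == p + 1) && pvConsecFrom (some x) xs
    | none => pvConsecFrom (some x) xs

theorem pvLoopA_eq (steps : List (List Char)) (i : Nat) (prev : Option Int) :
    pvLoopA steps i (i + steps.length) prev = pvLoopA' steps prev := by
  induction steps generalizing i prev with
  | nil => rfl
  | cons s rest ih =>
    have hlen0 : rest ≠ [] ↔ rest.length ≠ 0 := by simp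
    have harg : i + (s :: rest).length = (i + 1) + rest.length := by
      simp only [List.length_cons]; omega
    have hidx : (i ≠ i + 1 + rest.length - 1) ↔ rest ≠ [] := by rw [hlen0]; omega
    simp only [pvLoopA, pvLoopA', harg, hidx, ih]

theorem pvCodeLoop_eq (contents : List (List Char)) (i : Nat) :
    pvCodeLoop contents i (i + contents.length) = pvCodeLoop' contents := by
  induction contents generalizing i with
  | nil => rfl
  | cons c rest ih =>
    have hlen0 : rest ≠ [] ↔ rest.length ≠ 0 := by simp
    have harg : i + (c :: rest).length = (i + 1) + rest.length := by
      simp only [List.length_cons]; omega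
    have hidx : (i ≠ i + 1 + rest.length - 1) ↔ rest ≠ [] := by rw [hlen0]; omega
    simp only [pvCodeLoop, pvCodeLoop', harg, hidx, ih]

-- the heart: A's interleaved loop = conjunction of B's three phases
set_option maxHeartbeats 1000000 in
theorem pvLoopA'_phases (steps : List (List Char)) (prev : Option Int) :
    pvLoopA' steps prev =
      (steps.all (fun s => PySem.Chars.startswith s "<step>".toList) &&
       pvCodeLoop' (steps.map pvContent) &&
       (match pvNums (steps.map pvContent) with
        | none => false
        | some ns => pvConsecFrom prev ns)) := by
  induction steps generalizing prev with
  | nil => rfl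
  | cons s rest ih =>
    by_cases h1 : PySem.Chars.startswith s ['<', 's', 't', 'e', 'p', '>'] = true
    case neg => simp [pvLoopA', h1]
    case pos =>
    by_cases h2 : PySem.Chars.isIn ['`', '`', '`'] (pvContent s) = true
    · by_cases h3 : PySem.Chars.isIn ['<', 'c', 'o', 'd', 'e', '>'] (pvContent s) = true
      · by_cases h4 : rest = []
        · subst h4
          simp [pvLoopA', pvCodeLoop', pvNums, pvConsecFrom, h1, h2, h3]
        · simp [pvLoopA', pvCodeLoop', pvNums, h1, h2, h3, h4]
      · simp [pvLoopA', pvCodeLoop', h1, h2, h3]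
    · cases hfl : pvFirstLine (pvContent s) with
      | nil => simp [pvLoopA', pvCodeLoop', pvNums, h1, h2, hfl]
      | cons c cs =>
        by_cases hd : PySem.Chars.isdigit c = true
        · cases hns : pvNums (rest.map pvContent) with
          | none =>
            cases prev with
            | none => simp [pvLoopA', pvCodeLoop', pvNums, h1, h2, hfl, hd, hns, ih]
            | some p =>
              by_cases hc : ((c.toNat - 48 : Nat) : Int) = p + 1
              · simp [pvLoopA', pvCodeLoop', pvNums, h1, h2, hfl, hd, hns, hc, ih]
              · simp [pvLoopA', pvCodeLoop', pvNums, h1, h2, hfl, hd, hns, hc]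
          | some ns =>
            cases prev with
            | none => simp [pvLoopA', pvCodeLoop', pvNums, pvConsecFrom, h1, h2, hfl, hd, hns, ih]
            | some p =>
              by_cases hc : ((c.toNat - 48 : Nat) : Int) = p + 1
              · simp [pvLoopA', pvCodeLoop', pvNums, pvConsecFrom, h1, h2, hfl, hd, hns, hc, ih]
              · have hbeq : ((((c.toNat - 48 : Nat) : Int)) == p + 1) = false :=
                  beq_eq_false_iff_ne.mpr hc
                simp [pvLoopA', pvCodeLoop', pvNums, pvConsecFrom, h1, h2, hfl, hd, hns, hc, hbeq]
        · simp [pvLoopA', pvCodeLoop', pvNums, h1, h2, hfl, hd]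

theorem pvConsecFrom_some (p : Int) (ns : List Int) :
    pvConsecFrom (some p) ns = decide (ns = PySem.List.pyRange (p+1) (p+1+(ns.length : Nat)) 1) := by
  induction ns generalizing p with
  | nil =>
    rw [PySem.List.pyRange_one_eq_nil (by simp)]
    simp [pvConsecFrom]
  | cons x xs ih =>
    have hb : (p+1 : Int) < p+1+(((x :: xs).length : Nat) : Int) := by
      simp only [List.length_cons]; push_cast; omega
    rw [PySem.List.pyRange_one_cons hb]
    have harg : (p+1+(((x :: xs).length : Nat) : Int)) = (p+1+1)+((xs.length : Nat) : Int) := by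
      simp only [List.length_cons]; push_cast; ring
    rw [harg]
    by_cases hx : x = p + 1
    · subst hx
      simp only [pvConsecFrom, beq_self_eq_true, Bool.true_and, ih]
      simp
    · have hbeq : (x == p + 1) = false := beq_eq_false_iff_ne.mpr hx
      simp [pvConsecFrom, hbeq, hx]

theorem pvConsecFrom_none_range (n : Int) (ns : List Int) :
    pvConsecFrom none (n :: ns) =
      decide ((n :: ns) = PySem.List.pyRange n (n + (((n :: ns).length : Nat) : Int)) 1) := by
  have hb : (n : Int) < n + (((n :: ns).length : Nat) : Int) := by
    simp only [List.length_cons]; push_cast; omega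
  rw [PySem.List.pyRange_one_cons hb]
  have harg : (n + (((n :: ns).length : Nat) : Int)) = (n+1)+((ns.length : Nat) : Int) := by
    simp only [List.length_cons]; push_cast; ring
  rw [harg]
  simp only [pvConsecFrom, pvConsecFrom_some]
  simp

-- ===== VERDICT (by name: the statement is the Claim_ definition above) =====
theorem validate_step_format_spec : Claim_equal_validate_step_format := by
  intro text _
  unfold Spec_validate_step_format validate_step_format validate_step_format_alt
  by_cases h : pvCleanSteps text = []
  · simp [h]
  · rw [if_neg h, if_neg h]
    have hA : pvLoopA (pvCleanSteps text) 0 (pvCleanSteps text).length none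
        = pvLoopA' (pvCleanSteps text) none := by
      simpa using pvLoopA_eq (pvCleanSteps text) 0 none
    have hC : pvCodeLoop ((pvCleanSteps text).map pvContent) 0
        ((pvCleanSteps text).map pvContent).length
        = pvCodeLoop' ((pvCleanSteps text).map pvContent) := by
      simpa using pvCodeLoop_eq ((pvCleanSteps text).map pvContent) 0
    rw [hA, pvLoopA'_phases, hC]
    by_cases h1 : (pvCleanSteps text).all (fun s => PySem.Chars.startswith s "<step>".toList) = true
    · by_cases h2 : pvCodeLoop' ((pvCleanSteps text).map pvContent) = true
      · rw [if_neg (by rw [h1]; decide), if_neg (by rw [h2]; decide), h1, h2]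
        simp only [Bool.true_and]
        cases hns : pvNums ((pvCleanSteps text).map pvContent) with
        | none => rfl
        | some ns =>
          cases ns with
          | nil => rfl
          | cons n ns' => exact pvConsecFrom_none_range n ns'
      · have h2f : pvCodeLoop' ((pvCleanSteps text).map pvContent) = false := by
          cases hx : pvCodeLoop' ((pvCleanSteps text).map pvContent) <;> simp_all
        rw [if_neg (by rw [h1]; decide), if_pos h2, h1, h2f]
        simp
    · have h1f : ((pvCleanSteps text).all fun s => PySem.Chars.startswith s "<step>".toList) = false := by
        cases hx : ((pvCleanSteps text).all fun s => PySem.Chars.startswith s "<step>".toList) with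
        | false => rfl
        | true => exact absurd hx h1
      rw [if_pos h1, h1f]
      simp
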